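-- pv_equiv track=rewrite | github.com/rhyn0/LeetCode-Problems | challenges/november_2023/daily/time_collect_garbage.py | garbageCollectionNoCounter
-- ===== SOURCE A (Python) =====
-- from itertools import accumulate
--
-- def garbageCollectionNoCounter(garbage: list[str], travel: list[int]) -> int:
--     """Return same as above using no Counter."""
--     total_time = 0
--     # truck index is correlated to the abvoe string
--     truck_position: dict[str, int] = {}
--     # prefix with index 0, to simplify logic when a truck doesnt move
--     travel_prefix = [0, *list(accumulate(travel))]
--     for house_num, pile in enumerate(garbage):
--         for garbage_unit in pile:
--             truck_position[garbage_unit] = house_num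
--         total_time += len(pile)
--
--     return total_time + sum(
--         travel_prefix[truck_position[garbage_type]]
--         for garbage_type in truck_position
--     )
-- ===== SOURCE B (Python) =====
-- def garbageCollectionNoCounter(garbage: list[str], travel: list[int]) -> int:
--     """Pickup time plus, for each travel edge, its cost times the number of
--     truck types that still have garbage at or beyond the next house."""
--     total_time = sum(len(pile) for pile in garbage)
--     seen: set[str] = set()
--     travel_time = 0
--     for house_num in range(len(garbage) - 1, 0, -1):
--         for garbage_unit in garbage[house_num]:
--             seen.add(garbage_unit)
--         if seen:
--             travel_time += travel[house_num - 1] * len(seen)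
--     return total_time + travel_time
-- ===== Notes on version B (the rewrite author's own statement) =====
-- stated objective: simpler
-- what changed: Instead of building a dict of last truck positions plus an accumulate() prefix-sum array and summing prefix[lastpos] per truck type, B sweeps houses from the back, maintaining the set of truck types still active, and charges each travel edge once, multiplied by the number of active types; the pickup total is a plain sum of pile lengths.
import Mathlib
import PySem

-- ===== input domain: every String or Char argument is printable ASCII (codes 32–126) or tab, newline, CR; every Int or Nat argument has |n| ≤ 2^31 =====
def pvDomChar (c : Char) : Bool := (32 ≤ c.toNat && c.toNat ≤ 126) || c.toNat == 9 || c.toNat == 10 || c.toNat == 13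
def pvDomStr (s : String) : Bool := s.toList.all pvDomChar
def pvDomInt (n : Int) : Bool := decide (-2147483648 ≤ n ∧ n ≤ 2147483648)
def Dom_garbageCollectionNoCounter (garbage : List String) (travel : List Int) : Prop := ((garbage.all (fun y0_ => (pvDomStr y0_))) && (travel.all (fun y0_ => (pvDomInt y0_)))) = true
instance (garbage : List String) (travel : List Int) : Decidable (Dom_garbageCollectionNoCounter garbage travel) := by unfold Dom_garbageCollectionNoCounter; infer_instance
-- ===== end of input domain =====

-- B replaces A's last-position dict + accumulate() prefix array with a single backward sweep
-- charging each travel edge once, times the number of truck types still active (objective: simpler).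

-- ===== PORT A =====
-- state of the main loop: (total_time, truck_position); travel_prefix = [0, *accumulate(travel)].
-- pyGetD is the total form of travel_prefix[...]: Pre_ excludes the inputs where Python raises IndexError.
def garbageCollectionNoCounter (garbage : List String) (travel : List Int) : Int :=
  let travelPrefix : List Int :=
    0 :: (travel.foldl (fun (st : List Int × Int) t => (st.1 ++ [st.2 + t], st.2 + t)) ([], 0)).1
  let st := (PySem.List.enumerate garbage).foldl
    (fun (st : Int × PySem.Dict Char Int) hp =>
      (st.1 + PySem.Str.len hp.2,
       hp.2.toList.foldl (fun d c => d.insert c hp.1) st.2))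
    (0, PySem.Dict.empty)
  st.1 + ((st.2.keys).map
    (fun c => PySem.List.pyGetD travelPrefix (st.2.getD c 0) 0)).sum

-- ===== PORT B =====
-- pyGetD travel (i-1) 0 is reached only with seen ≠ []; Pre_ excludes the inputs where Python raises IndexError.
def garbageCollectionNoCounter_alt (garbage : List String) (travel : List Int) : Int :=
  let totalTime : Int := (garbage.map (fun pile => PySem.Str.len pile)).sum
  let st := (PySem.List.pyRange ((garbage.length : Int) - 1) 0 (-1)).foldl
    (fun (st : PySem.Set Char × Int) i =>
      let seen := st.1.update (PySem.List.pyGetD garbage i "").toList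
      if seen = [] then (seen, st.2)
      else (seen, st.2 + PySem.List.pyGetD travel (i - 1) 0 * PySem.Set.len seen))
    (PySem.Set.empty, 0)
  totalTime + st.2

-- ===== PRECONDITION & SPEC =====
-- Pre_ excludes exactly the inputs where A raises IndexError (travel_prefix[last position of a
-- truck type] with that position beyond len(travel)); B raises IndexError on the same inputs.
def Pre_garbageCollectionNoCounter (garbage : List String) (travel : List Int) : Prop :=
  ∀ i : Nat, i < garbage.length → garbage[i]! ≠ "" → i ≤ travel.length
instance (garbage : List String) (travel : List Int) : Decidable (Pre_garbageCollectionNoCounter garbage travel) := by unfold Pre_garbageCollectionNoCounter; infer_instance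

def pvWitness_garbageCollectionNoCounter : List String × List Int := (["MP", "G"], [3, 5])

def Spec_garbageCollectionNoCounter (garbage : List String) (travel : List Int) (out : Int) : Prop := out = garbageCollectionNoCounter_alt garbage travel
instance (garbage : List String) (travel : List Int) (out : Int) : Decidable (Spec_garbageCollectionNoCounter garbage travel out) := by unfold Spec_garbageCollectionNoCounter; infer_instance

-- ===== CLAIM (what is proved, stated in full; the proofs are below) =====
def Claim_equal_garbageCollectionNoCounter : Prop := ∀ (garbage : List String) (travel : List Int), Dom_garbageCollectionNoCounter garbage travel → Pre_garbageCollectionNoCounter garbage travel → Spec_garbageCollectionNoCounter garbage travel (garbageCollectionNoCounter garbage travel)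

-- ===== LEMMAS AND PROOFS =====

-- index of the LAST pile containing c (none if c occurs nowhere)
def lastPos? : List String → Char → Option Nat
  | [], _ => none
  | p :: t, c =>
    match lastPos? t c with
    | some j => some (j + 1)
    | none => if c ∈ p.toList then some 0 else none

-- total version used inside predicates
def lpN (gs : List String) (c : Char) : Nat := (lastPos? gs c).getD 0

-- number of distinct characters in the piles from house k on
def ndist (gs : List String) (k : Nat) : Nat :=
  (PySem.Set.ofList ((gs.drop k).flatMap String.toList)).length

-- the accumulate() fold computes the list of nonempty-prefix sums (and the running total)
theorem accum_spec (travel : List Int) :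
    travel.foldl (fun (st : List Int × Int) t => (st.1 ++ [st.2 + t], st.2 + t)) ([], 0)
      = ((List.range travel.length).map (fun i => (travel.take (i + 1)).sum), travel.sum) := by
  induction travel using List.reverseRecOn with
  | nil => simp
  | append_singleton tr t ih =>
    rw [List.foldl_append, ih]
    simp [List.range_succ, List.sum_append]
    intro i hi
    rw [List.take_append_of_le_length (by omega)]

-- travel_prefix[j] = sum of the first j travel legs, for j ≤ len(travel)
theorem prefix_get (travel : List Int) (j : Nat) (hj : j ≤ travel.length) :
    PySem.List.pyGetD
      (0 :: (travel.foldl (fun (st : List Int × Int) t => (st.1 ++ [st.2 + t], st.2 + t)) ([], 0)).1)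
      (j : Int) 0 = (travel.take j).sum := by
  rw [accum_spec, PySem.List.pyGetD_natCast]
  cases j with
  | zero => simp
  | succ k =>
    simp only [List.getD_cons_succ]
    rw [List.getD_eq_getElem _ _ (by simpa using hj)]
    simp

-- A's inner char loop: lookup after inserting every char of p at position pos
theorem innerInsert_get? (p : List Char) (pos : Int) (d : PySem.Dict Char Int) (c : Char) :
    (p.foldl (fun d c => d.insert c pos) d).get? c = if c ∈ p then some pos else d.get? c := by
  induction p generalizing d with
  | nil => simp
  | cons x xs ih =>
    simp only [List.foldl_cons, ih]
    by_cases hc : c ∈ xs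
    · simp [hc]
    · by_cases hcx : c = x
      · subst hcx; simp [hc, PySem.Dict.get?_insert_self]
      · simp [hc, hcx, PySem.Dict.get?_insert_of_ne _ _ hcx]

-- A's dict after the whole loop: each char maps to (start index + its last position)
theorem dictFold_get? (gs : List String) (s : Int) (d : PySem.Dict Char Int) (c : Char) :
    ((PySem.List.enumerate gs s).foldl
        (fun d hp => hp.2.toList.foldl (fun d c => d.insert c hp.1) d) d).get? c
      = match lastPos? gs c with
        | some j => some (s + j)
        | none => d.get? c := by
  induction gs generalizing s d with
  | nil => simp [lastPos?, PySem.List.enumerate_nil]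
  | cons p t ih =>
    rw [PySem.List.enumerate_cons]
    simp only [List.foldl_cons]
    rw [ih]
    cases h : lastPos? t c with
    | some j =>
      have h2 : lastPos? (p :: t) c = some (j + 1) := by simp [lastPos?, h]
      rw [h2]
      simp; ring
    | none =>
      have h2 : lastPos? (p :: t) c = if c ∈ p.toList then some 0 else none := by
        simp [lastPos?, h]
      rw [h2, innerInsert_get?]
      by_cases hc : c ∈ p.toList <;> simp [hc]

theorem dictFold_nodup (gs : List String) (s : Int) (d : PySem.Dict Char Int)
    (hd : d.keys.Nodup) :
    ((PySem.List.enumerate gs s).foldl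
        (fun d hp => hp.2.toList.foldl (fun d c => d.insert c hp.1) d) d).keys.Nodup := by
  induction gs generalizing s d with
  | nil => simpa [PySem.List.enumerate_nil]
  | cons p t ih =>
    rw [PySem.List.enumerate_cons]
    simp only [List.foldl_cons]
    exact ih _ _ (PySem.Dict.nodup_keys_foldl_insert _ (fun _ _ => s) _ hd)

theorem lastPos?_lt (gs : List String) (c : Char) (j : Nat) (h : lastPos? gs c = some j) :
    ∃ h : j < gs.length, c ∈ gs[j].toList := by
  induction gs generalizing j with
  | nil => simp [lastPos?] at h
  | cons p t ih =>
    unfold lastPos? at h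
    cases hh : lastPos? t c with
    | some i =>
      rw [hh] at h
      simp at h
      obtain ⟨hi, hm⟩ := ih i hh
      exact ⟨by simp; omega, by simp [← h]; simpa [Nat.sub_one] using hm⟩
    | none =>
      rw [hh] at h
      by_cases hc : c ∈ p.toList
      · simp [hc] at h
        exact ⟨by simp; omega, by simp [← h]; exact hc⟩
      · simp [hc] at h

-- c occurs in the piles from house k on iff its last position is ≥ k
theorem mem_dropFlat_iff (gs : List String) (k : Nat) (c : Char) :
    c ∈ (gs.drop k).flatMap String.toList ↔ ∃ j, lastPos? gs c = some j ∧ k ≤ j := by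
  induction gs generalizing k with
  | nil => simp [lastPos?]
  | cons p t ih =>
    cases k with
    | zero =>
      simp only [List.drop_zero, List.flatMap_cons, List.mem_append]
      constructor
      · intro h
        cases h with
        | inl h =>
          cases hh : lastPos? t c with
          | some j => exact ⟨j + 1, by simp [lastPos?, hh], by omega⟩
          | none => exact ⟨0, by simp [lastPos?, hh, h], by omega⟩
        | inr h =>
          obtain ⟨j, hj, _⟩ := (ih 0).mp (by simpa using h)
          exact ⟨j + 1, by simp [lastPos?, hj], by omega⟩
      · intro ⟨j, hj, _⟩
        unfold lastPos? at hj
        cases hh : lastPos? t c with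
        | some i =>
          right
          have := (ih 0).mpr ⟨i, hh, by omega⟩
          simpa using this
        | none =>
          rw [hh] at hj
          by_cases hc : c ∈ p.toList
          · exact Or.inl hc
          · simp [hc] at hj
    | succ k =>
      simp only [List.drop_succ_cons]
      rw [ih k]
      constructor
      · intro ⟨j, hj, hk⟩
        exact ⟨j + 1, by simp [lastPos?, hj], by omega⟩
      · intro ⟨j, hj, hk⟩
        unfold lastPos? at hj
        cases hh : lastPos? t c with
        | some i =>
          rw [hh] at hj
          simp at hj
          exact ⟨i, rfl, by omega⟩
        | none =>
          rw [hh] at hj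
          by_cases hc : c ∈ p.toList <;> simp [hc] at hj <;> omega

-- exchange of a double list-sum (Int)
theorem sum_swap {α β : Type} (K : List α) (I : List β) (F : α → β → Int) :
    (K.map (fun c => (I.map (F c)).sum)).sum = (I.map (fun i => (K.map (fun c => F c i)).sum)).sum := by
  induction K with
  | nil => simp
  | cons c K ih =>
    simp only [List.map_cons, List.sum_cons, ih]
    rw [← PySem.List.sum_map_add_int]

-- sum of the first j legs, written over the fixed index range m ≥ j
theorem take_sum_eq (travel : List Int) (j m : Nat) (hjm : j ≤ m) (hj : j ≤ travel.length) :
    (travel.take j).sum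
      = ((List.range m).map (fun i => if i + 1 ≤ j then PySem.List.pyGetD travel (i : Int) 0 else 0)).sum := by
  have key : ∀ (j : Nat), j ≤ travel.length →
      (travel.take j).sum = ((List.range j).map (fun (i : Nat) => PySem.List.pyGetD travel (i : Int) 0)).sum := by
    intro j hj
    induction j with
    | zero => simp
    | succ k ihk =>
      rw [List.range_succ, List.map_append, List.sum_append, ← ihk (by omega)]
      have : travel.take (k + 1) = travel.take k ++ [travel[k]] := by
        rw [List.take_add_one]
        simp [List.getElem?_eq_getElem (by omega : k < travel.length)]
      rw [this, List.sum_append]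
      simp [PySem.List.pyGetD_natCast, List.getD_eq_getElem?_getD,
        List.getElem?_eq_getElem (show k < travel.length by omega)]
      rfl
  obtain ⟨r, hr⟩ : ∃ r, m = j + r := ⟨m - j, by omega⟩
  subst hr
  rw [List.range_add, List.map_append, List.sum_append, key j hj]
  have h1 : ((List.range j).map (fun i => if i + 1 ≤ j then PySem.List.pyGetD travel (i : Int) 0 else 0))
      = (List.range j).map (fun (i : Nat) => PySem.List.pyGetD travel (i : Int) 0) := by
    apply List.map_congr_left; intro i hi; simp at hi; simp [Nat.succ_le_of_lt hi]
  have h2 : (((List.range r).map (fun i => j + i)).map (fun i => if i + 1 ≤ j then PySem.List.pyGetD travel (i : Int) 0 else 0)) = (List.range r).map (fun _ => (0 : Int)) := by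
    rw [List.map_map]; apply List.map_congr_left; intro i hi
    simp
  rw [h1, h2]
  simp

-- a sum of "pay t if the type is still active" over the types is t · (number of active types)
theorem sum_ite_eq_count {K : List Char} (t : Int) (p : Char → Prop) [DecidablePred p] :
    (K.map (fun c => if p c then t else 0)).sum = t * (K.countP (fun c => decide (p c)) : Int) := by
  induction K with
  | nil => simp
  | cons c K ih =>
    simp only [List.map_cons, List.sum_cons, ih, List.countP_cons]
    by_cases hc : p c <;> simp [hc] <;> ring

-- counting the active types in any nodup enumeration K of the occurring chars gives ndist
theorem countP_eq_ndist (gs : List String) (K : List Char) (hnd : K.Nodup)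
    (hmem : ∀ c, c ∈ K ↔ lastPos? gs c ≠ none) (k : Nat) :
    K.countP (fun c => decide (k ≤ lpN gs c)) = ndist gs k := by
  rw [List.countP_eq_length_filter]
  have h1 : (K.filter (fun c => decide (k ≤ lpN gs c))).Nodup := hnd.filter _
  have h2 : (PySem.Set.ofList ((gs.drop k).flatMap String.toList)).Nodup :=
    PySem.Set.nodup_ofList _
  have hperm : (K.filter (fun c => decide (k ≤ lpN gs c))).Perm
      (PySem.Set.ofList ((gs.drop k).flatMap String.toList)) := by
    rw [List.perm_ext_iff_of_nodup h1 h2]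
    intro c
    simp only [List.mem_filter, decide_eq_true_eq, PySem.Set.mem_ofList, hmem c, mem_dropFlat_iff]
    constructor
    · rintro ⟨hne, hle⟩
      cases h : lastPos? gs c with
      | none => exact absurd h hne
      | some j =>
        refine ⟨j, rfl, ?_⟩
        unfold lpN at hle; rw [h] at hle; simpa using hle
    · rintro ⟨j, hj, hk2⟩
      exact ⟨by simp [hj], by unfold lpN; rw [hj]; simpa⟩
  exact hperm.length_eq

-- B's backward sweep: closed form of the travel-time accumulator
theorem sweep_spec (garbage : List String) (travel : List Int) (k : Nat)
    (hk : k < garbage.length) (seen : PySem.Set Char) (acc : Int)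
    (hnd : seen.Nodup)
    (hmem : ∀ c, c ∈ seen ↔ c ∈ (garbage.drop (k + 1)).flatMap String.toList) :
    ((PySem.List.pyRange (k : Int) 0 (-1)).foldl
        (fun (st : PySem.Set Char × Int) i =>
          let seen := st.1.update (PySem.List.pyGetD garbage i "").toList
          if seen = [] then (seen, st.2)
          else (seen, st.2 + PySem.List.pyGetD travel (i - 1) 0 * PySem.Set.len seen))
        (seen, acc)).2
      = acc + ((List.range k).map
          (fun (i : Nat) => PySem.List.pyGetD travel (i : Int) 0 * (ndist garbage (i + 1) : Int))).sum := by
  induction k generalizing seen acc with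
  | zero =>
    rw [PySem.List.pyRange_neg_one_eq_nil (by norm_num)]
    simp
  | succ k ih =>
    rw [PySem.List.pyRange_neg_one_cons (by positivity)]
    have hcast : ((k + 1 : Nat) : Int) - 1 = (k : Nat) := by omega
    rw [List.foldl_cons]
    set seen' := seen.update (PySem.List.pyGetD garbage ((k + 1 : Nat) : Int) "").toList with hseen'
    have hpile : PySem.List.pyGetD garbage ((k + 1 : Nat) : Int) "" = garbage[k + 1] := by
      rw [PySem.List.pyGetD_natCast, List.getD_eq_getElem _ _ hk]
    have hmem' : ∀ c, c ∈ seen' ↔ c ∈ (garbage.drop (k + 1)).flatMap String.toList := by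
      intro c
      rw [hseen', PySem.Set.mem_update, hpile,
        List.drop_eq_getElem_cons hk, List.flatMap_cons, List.mem_append, hmem c]
      tauto
    have hnd' : seen'.Nodup := PySem.Set.nodup_update _ _ hnd
    have hlen : PySem.Set.len seen' = (ndist garbage (k + 1) : Int) := by
      have hperm : seen'.Perm (PySem.Set.ofList ((garbage.drop (k + 1)).flatMap String.toList)) := by
        rw [List.perm_ext_iff_of_nodup hnd' (PySem.Set.nodup_ofList _)]
        intro c; rw [hmem' c, PySem.Set.mem_ofList]
      simp [PySem.Set.len, ndist, hperm.length_eq]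
    have hstep :
        (let s2 := seen.update (PySem.List.pyGetD garbage ((k + 1 : Nat) : Int) "").toList
          if s2 = [] then (s2, acc)
          else (s2, acc + PySem.List.pyGetD travel (((k + 1 : Nat) : Int) - 1) 0 * PySem.Set.len s2))
        = (seen', acc + PySem.List.pyGetD travel ((k : Nat) : Int) 0 * (ndist garbage (k + 1) : Int)) := by
      rw [hcast] at *
      by_cases he : seen' = []
      · simp only [← hseen', he]
        rw [he] at hlen
        simp [← hlen]
      · simp only [← hseen', if_neg he, hlen]
    rw [hstep, hcast]
    rw [ih (by omega) seen' _ hnd' hmem']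
    rw [List.range_succ, List.map_append, List.sum_append]
    simp
    ring

-- B as a closed form
theorem alt_closed (garbage : List String) (travel : List Int) :
    garbageCollectionNoCounter_alt garbage travel
      = (garbage.map (fun pile => PySem.Str.len pile)).sum
        + ((List.range (garbage.length - 1)).map
            (fun (i : Nat) => PySem.List.pyGetD travel (i : Int) 0 * (ndist garbage (i + 1) : Int))).sum := by
  unfold garbageCollectionNoCounter_alt
  dsimp only
  cases hg : garbage with
  | nil =>
    rw [PySem.List.pyRange_neg_one_eq_nil (by simp)]
    simp
  | cons p t =>
    rw [← hg]
    have hlen : (garbage.length : Int) - 1 = ((garbage.length - 1 : Nat) : Int) := by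
      rw [hg]; simp
    rw [hlen]
    rw [sweep_spec garbage travel (garbage.length - 1) (by rw [hg]; simp)
      PySem.Set.empty 0 (by simp [PySem.Set.empty])
      (by intro c; simp [PySem.Set.empty, show garbage.length - 1 + 1 = garbage.length by rw [hg]; simp])]
    simp

-- A as a closed form over the key list K of its dict
theorem a_closed (garbage : List String) (travel : List Int)
    (hpre : Pre_garbageCollectionNoCounter garbage travel) :
    ∃ K : List Char, K.Nodup ∧ (∀ c, c ∈ K ↔ lastPos? garbage c ≠ none) ∧
      garbageCollectionNoCounter garbage travel
        = (garbage.map (fun pile => PySem.Str.len pile)).sum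
          + (K.map (fun c => (travel.take (lpN garbage c)).sum)).sum := by
  unfold garbageCollectionNoCounter
  dsimp only
  rw [PySem.List.foldl_prod_mk (f := fun (a : Int) (hp : Int × String) => a + PySem.Str.len hp.2)
    (g := fun (d : PySem.Dict Char Int) (hp : Int × String) =>
      hp.2.toList.foldl (fun d c => d.insert c hp.1) d)]
  set D := (PySem.List.enumerate garbage).foldl
    (fun (d : PySem.Dict Char Int) hp => hp.2.toList.foldl (fun d c => d.insert c hp.1) d)
    PySem.Dict.empty with hD
  have hget : ∀ c, D.get? c = match lastPos? garbage c with
      | some j => some ((j : Int))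
      | none => none := by
    intro c
    rw [hD, dictFold_get?]
    cases lastPos? garbage c <;> simp
  have hnd : D.keys.Nodup := dictFold_nodup _ _ _ (by simp [PySem.Dict.empty])
  have hmem : ∀ c, c ∈ D.keys ↔ lastPos? garbage c ≠ none := by
    intro c
    have h0 := PySem.Dict.get?_eq_none_iff_not_mem_keys (d := D) (k := c)
    cases h : lastPos? garbage c with
    | none =>
      simp only [ne_eq, not_true_eq_false, iff_false]
      intro hcK
      exact h0.mp (by rw [hget c, h]) hcK
    | some j =>
      simp only [ne_eq, reduceCtorEq, not_false_iff, iff_true]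
      by_contra hcK
      have h1 := h0.mpr hcK
      rw [hget c, h] at h1
      simp at h1
  refine ⟨D.keys, hnd, hmem, ?_⟩
  have hfst : (PySem.List.enumerate garbage).foldl
      (fun (a : Int) (hp : Int × String) => a + PySem.Str.len hp.2) 0
      = (garbage.map (fun pile => PySem.Str.len pile)).sum := by
    rw [PySem.List.foldl_add]
    have : (PySem.List.enumerate garbage).map (fun hp => PySem.Str.len hp.2)
        = garbage.map (fun pile => PySem.Str.len pile) := by
      rw [show (fun (hp : Int × String) => PySem.Str.len hp.2)
          = (fun pile => PySem.Str.len pile) ∘ (fun (hp : Int × String) => hp.2) from rfl,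
        ← List.map_map, PySem.List.map_snd_enumerate]
    rw [this]; ring_nf
  rw [hfst]
  congr 1
  dsimp only
  apply congrArg
  apply List.map_congr_left
  intro c hc
  have hne := (hmem c).mp hc
  cases h : lastPos? garbage c with
  | none => exact absurd h hne
  | some j =>
    have hgd : D.getD c 0 = (j : Int) := by
      rw [PySem.Dict.getD_eq_get?_getD, hget c, h]
      rfl
    rw [hgd]
    obtain ⟨hj, hcj⟩ := lastPos?_lt garbage c j h
    have hjt : j ≤ travel.length := by
      apply hpre j hj
      intro hemp
      rw [getElem!_pos garbage j hj] at hemp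
      rw [hemp] at hcj
      simpa using hcj
    rw [prefix_get travel j hjt]
    simp [lpN, h]

-- ===== VERDICT (by name: the statement is the Claim_ definition above) =====
theorem garbageCollectionNoCounter_spec : Claim_equal_garbageCollectionNoCounter := by
  intro garbage travel _hdom hpre
  unfold Spec_garbageCollectionNoCounter
  obtain ⟨K, hnd, hmem, hA⟩ := a_closed garbage travel hpre
  rw [hA, alt_closed]
  congr 1
  have step1 : (K.map (fun c => (travel.take (lpN garbage c)).sum)).sum
      = (K.map (fun c => ((List.range (garbage.length - 1)).map
          (fun i => if i + 1 ≤ lpN garbage c then PySem.List.pyGetD travel (i : Int) 0 else 0)).sum)).sum := by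
    apply congrArg
    apply List.map_congr_left
    intro c hc
    have hne := (hmem c).mp hc
    cases h : lastPos? garbage c with
    | none => exact absurd h hne
    | some j =>
      obtain ⟨hj, hcj⟩ := lastPos?_lt garbage c j h
      have hjt : j ≤ travel.length := by
        apply hpre j hj
        intro hemp
        rw [getElem!_pos garbage j hj] at hemp
        rw [hemp] at hcj
        simp at hcj
      rw [show lpN garbage c = j by simp [lpN, h]]
      exact take_sum_eq travel j (garbage.length - 1) (by omega) hjt
  rw [step1, sum_swap]
  apply congrArg
  apply List.map_congr_left
  intro i hi
  rw [sum_ite_eq_count (p := fun c => i + 1 ≤ lpN garbage c)]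
  rw [countP_eq_ndist garbage K hnd hmem (i + 1)]
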